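-- pv_equiv track=rewrite | github.com/kanga-prog/holbertonschool-interview | lockboxes/0-lockboxes.py | canUnlockAll
-- ===== SOURCE A (Python) =====
-- def canUnlockAll(boxes):
--     """
--     Determines if all boxes can be opened.
--
--     Args:
--         boxes (list of list of int): List of boxes, each containing keys
--
--     Returns:
--         bool: True if all boxes can be opened, else False
--     """
--     if not boxes or type(boxes) is not list:
--         return False
--
--     n = len(boxes)
--     opened = set([0])      # box 0 is initially opened
--     keys = set(boxes[0])   # keys from the first box
--
--     while True:
--         opened_before = len(opened)
--
--         for key in list(keys):
--             if 0 <= key < n and key not in opened: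
--                 opened.add(key)
--                 keys.update(boxes[key])
--
--         # Stop if no new boxes were opened
--         if len(opened) == opened_before:
--             break
--
--     return len(opened) == n
-- ===== SOURCE B (Python) =====
-- def canUnlockAll(boxes):
--     """Determines if all boxes can be opened (DFS from box 0, each box visited once)."""
--     if not boxes or type(boxes) is not list:
--         return False
--     n = len(boxes)
--     visited = {0}
--     stack = [0]
--     while stack:
--         box = stack.pop()
--         for key in boxes[box]:
--             if 0 <= key < n and key not in visited:
--                 visited.add(key)
--                 stack.append(key)
--     return len(visited) == n
-- ===== Notes on version B (the rewrite author's own statement) =====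
-- stated objective: alternative
-- what changed: Replaces A's repeated whole-key-set fixpoint sweeps (re-scanning the growing key set until no new box opens) with a single DFS from box 0 using a worklist stack, so each box's key list is scanned exactly once.
import Mathlib
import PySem

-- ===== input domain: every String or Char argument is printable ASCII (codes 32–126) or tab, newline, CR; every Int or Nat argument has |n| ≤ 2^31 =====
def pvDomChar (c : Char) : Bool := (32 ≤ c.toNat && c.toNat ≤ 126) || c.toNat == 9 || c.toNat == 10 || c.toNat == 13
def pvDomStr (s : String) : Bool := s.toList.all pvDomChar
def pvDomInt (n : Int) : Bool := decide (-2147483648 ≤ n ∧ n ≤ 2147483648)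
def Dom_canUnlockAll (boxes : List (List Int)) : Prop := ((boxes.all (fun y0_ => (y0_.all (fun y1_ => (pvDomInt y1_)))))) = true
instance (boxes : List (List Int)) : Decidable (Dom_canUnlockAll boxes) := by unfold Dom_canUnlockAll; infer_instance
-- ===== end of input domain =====

-- B replaces A's repeated fixpoint sweeps over the whole key set by a single DFS with a
-- worklist stack that scans each box's keys once (objective: alternative algorithm; a
-- timing run did not confirm a ≥1.5× speed-up on the generated inputs).
-- A's `for key in list(keys)` iterates a Python set whose hash order is not modelled;
-- the ports iterate in insertion order — exact for the Bool result, which is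
-- independent of that order (proved: the final opened set is the reachable set).

-- boxes[b] for an index known to be in range (both Pythons guard 0 <= key < n first)
def pvKeys (boxes : List (List Int)) (b : Int) : List Int :=
  (PySem.List.pyGet? boxes b).getD []

-- ===== PORT A =====
-- the `for key in list(keys)` pass: snapshot list l, state (opened, keys)
def pvPassA (n : Int) (boxes : List (List Int)) :
    List Int → PySem.Set Int → PySem.Set Int → PySem.Set Int × PySem.Set Int
  | [], opened, keys => (opened, keys)
  | k :: rest, opened, keys =>
      if 0 ≤ k ∧ k < n ∧ k ∉ opened then
        pvPassA n boxes rest (PySem.Set.add opened k)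
          (PySem.Set.update keys (pvKeys boxes k))
      else pvPassA n boxes rest opened keys

-- the `while True` loop; fuel only makes it total (the proof shows n+1 rounds always reach the break)
def pvLoopA (n : Int) (boxes : List (List Int)) :
    Nat → PySem.Set Int → PySem.Set Int → PySem.Set Int
  | 0, opened, _ => opened
  | fuel + 1, opened, keys =>
      let p := pvPassA n boxes keys opened keys
      if PySem.Set.len p.1 = PySem.Set.len opened then p.1
      else pvLoopA n boxes fuel p.1 p.2

def canUnlockAll (boxes : List (List Int)) : Bool :=
  if boxes = [] then false
  else
    let n : Int := boxes.length
    let opened : PySem.Set Int := PySem.Set.ofList [0]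
    let keys : PySem.Set Int := PySem.Set.ofList (pvKeys boxes 0)
    decide (PySem.Set.len (pvLoopA n boxes (boxes.length + 1) opened keys) = n)

-- ===== PORT B =====
-- the `for key in boxes[box]` body: push fresh in-range keys (cons-list stack, head = top)
def pvScanB (n : Int) :
    List Int → PySem.Set Int → List Int → PySem.Set Int × List Int
  | [], visited, stack => (visited, stack)
  | k :: rest, visited, stack =>
      if 0 ≤ k ∧ k < n ∧ k ∉ visited then
        pvScanB n rest (PySem.Set.add visited k) (k :: stack)
      else pvScanB n rest visited stack

-- the `while stack` loop; fuel only makes it total (each box is pushed at most once)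
def pvDfsB (n : Int) (boxes : List (List Int)) :
    Nat → PySem.Set Int → List Int → PySem.Set Int
  | 0, visited, _ => visited
  | _ + 1, visited, [] => visited
  | fuel + 1, visited, box :: rest =>
      let p := pvScanB n (pvKeys boxes box) visited rest
      pvDfsB n boxes fuel p.1 p.2

def canUnlockAll_alt (boxes : List (List Int)) : Bool :=
  if boxes = [] then false
  else
    let n : Int := boxes.length
    decide (PySem.Set.len (pvDfsB n boxes boxes.length (PySem.Set.ofList [0]) [0]) = n)

-- ===== PRECONDITION & SPEC =====
def Spec_canUnlockAll (boxes : List (List Int)) (out : Bool) : Prop := out = canUnlockAll_alt boxes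
instance (boxes : List (List Int)) (out : Bool) : Decidable (Spec_canUnlockAll boxes out) := by unfold Spec_canUnlockAll; infer_instance

-- ===== CLAIM (what is proved, stated in full; the proofs are below) =====
def Claim_equal_canUnlockAll : Prop := ∀ (boxes : List (List Int)), Dom_canUnlockAll boxes → Spec_canUnlockAll boxes (canUnlockAll boxes)

-- ===== LEMMAS AND PROOFS =====

-- the boxes reachable from box 0 through in-range keys
inductive pvReach (boxes : List (List Int)) : Int → Prop where
  | zero : pvReach boxes 0
  | step {b k : Int} : pvReach boxes b → k ∈ pvKeys boxes b → 0 ≤ k →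
      k < (boxes.length : Int) → pvReach boxes k

-- a Nodup list that is exactly the reachable set (both programs' final set is pvGood)
def pvGood (boxes : List (List Int)) (S : List Int) : Prop :=
  S.Nodup ∧ 0 ∈ S ∧
  (∀ x ∈ S, pvReach boxes x ∧ 0 ≤ x ∧ x < (boxes.length : Int)) ∧
  (∀ b ∈ S, ∀ k ∈ pvKeys boxes b, 0 ≤ k → k < (boxes.length : Int) → k ∈ S)

theorem pvReach_mem {boxes : List (List Int)} {T : List Int}
    (h0 : 0 ∈ T)
    (hc : ∀ b ∈ T, ∀ k ∈ pvKeys boxes b, 0 ≤ k → k < (boxes.length : Int) → k ∈ T)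
    {x : Int} (hx : pvReach boxes x) : x ∈ T := by
  induction hx with
  | zero => exact h0
  | step hb hk h0k hkn ih => exact hc _ ih _ hk h0k hkn

theorem pvGood_length_eq {boxes : List (List Int)} {S T : List Int}
    (hS : pvGood boxes S) (hT : pvGood boxes T) : S.length = T.length := by
  obtain ⟨hSn, hS0, hSr, hSc⟩ := hS
  obtain ⟨hTn, hT0, hTr, hTc⟩ := hT
  refine List.Perm.length_eq ?_
  rw [List.perm_ext_iff_of_nodup hSn hTn]
  intro a
  constructor
  · intro ha; exact pvReach_mem hT0 hTc (hSr a ha).1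
  · intro ha; exact pvReach_mem hS0 hSc (hTr a ha).1

-- a Nodup list of ints in [0, m) has at most m elements
theorem pvNodup_bounded_length {l : List Int} {m : Nat} (hn : l.Nodup)
    (hb : ∀ x ∈ l, 0 ≤ x ∧ x < (m : Int)) : l.length ≤ m := by
  have hsub : l.toFinset ⊆ Finset.Ico (0 : Int) m := by
    intro x hx
    rw [List.mem_toFinset] at hx
    simp only [Finset.mem_Ico]
    exact hb x hx
  have hcard := Finset.card_le_card hsub
  rw [List.toFinset_card_of_nodup hn] at hcard
  have hico : (Finset.Ico (0 : Int) (m : Int)).card = m := by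
    rw [Int.card_Ico]; omega
  omega

theorem pvSet_len_eq {s : PySem.Set Int} : PySem.Set.len s = (s.length : Int) := rfl

-- ---------- A side ----------

def pvInvA (boxes : List (List Int)) (opened keys : List Int) : Prop :=
  opened.Nodup ∧ 0 ∈ opened ∧
  (∀ x ∈ opened, pvReach boxes x ∧ 0 ≤ x ∧ x < (boxes.length : Int)) ∧
  (∀ k ∈ keys, 0 ≤ k → k < (boxes.length : Int) → pvReach boxes k) ∧
  (∀ b ∈ opened, ∀ k ∈ pvKeys boxes b, k ∈ keys)

theorem pvPassA_len_mono (boxes : List (List Int)) (l : List Int)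
    (opened keys : List Int) :
    opened.length ≤ (pvPassA boxes.length boxes l opened keys).1.length := by
  induction l generalizing opened keys with
  | nil => exact le_refl _
  | cons k rest ih =>
      simp only [pvPassA]
      split
      · rename_i h
        have h1 : (PySem.Set.add opened k).length = opened.length + 1 := by
          rw [PySem.Set.add_of_not_mem h.2.2]; simp
        have := ih (PySem.Set.add opened k) (PySem.Set.update keys (pvKeys boxes k))
        omega
      · exact ih _ _

theorem pvPassA_inv (boxes : List (List Int)) (l : List Int)
    (opened keys : List Int)
    (hl : ∀ k ∈ l, 0 ≤ k → k < (boxes.length : Int) → pvReach boxes k)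
    (h : pvInvA boxes opened keys) :
    pvInvA boxes (pvPassA boxes.length boxes l opened keys).1
      (pvPassA boxes.length boxes l opened keys).2 := by
  induction l generalizing opened keys with
  | nil => exact h
  | cons k rest ih =>
      simp only [pvPassA]
      split
      · rename_i hc
        obtain ⟨h0k, hkn, hko⟩ := hc
        have hrk : pvReach boxes k := hl k (List.mem_cons_self) h0k hkn
        refine ih _ _ (fun x hx => hl x (List.mem_cons_of_mem _ hx)) ?_
        obtain ⟨hn, h0, hr, hks, hcov⟩ := h
        refine ⟨PySem.Set.nodup_add _ _ hn,
          (PySem.Set.mem_add opened k 0).mpr (Or.inl h0), ?_, ?_, ?_⟩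
        · intro x hx
          rcases (PySem.Set.mem_add opened k x).mp hx with hx | rfl
          · exact hr x hx
          · exact ⟨hrk, h0k, hkn⟩
        · intro k2 hk2 h0k2 hk2n
          rcases (PySem.Set.mem_update keys (pvKeys boxes k) k2).mp hk2 with hk2 | hk2
          · exact hks k2 hk2 h0k2 hk2n
          · exact pvReach.step hrk hk2 h0k2 hk2n
        · intro b hb k2 hk2
          rcases (PySem.Set.mem_add opened k b).mp hb with hb | rfl
          · exact (PySem.Set.mem_update keys (pvKeys boxes k) k2).mpr (Or.inl (hcov b hb k2 hk2))
          · exact (PySem.Set.mem_update keys (pvKeys boxes b) k2).mpr (Or.inr hk2)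
      · exact ih _ _ (fun x hx => hl x (List.mem_cons_of_mem _ hx)) h

-- if a pass added nothing, state is unchanged and every in-range snapshot key was already opened
theorem pvPassA_fix (boxes : List (List Int)) (l : List Int)
    (opened keys : List Int)
    (hlen : (pvPassA boxes.length boxes l opened keys).1.length = opened.length) :
    (pvPassA boxes.length boxes l opened keys).1 = opened ∧
    (pvPassA boxes.length boxes l opened keys).2 = keys ∧
    (∀ k ∈ l, 0 ≤ k → k < (boxes.length : Int) → k ∈ opened) := by
  induction l generalizing opened keys with
  | nil => exact ⟨rfl, rfl, by intro k hk; cases hk⟩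
  | cons k rest ih =>
      simp only [pvPassA] at hlen ⊢
      split
      · rename_i h
        exfalso
        rw [if_pos h] at hlen
        have h1 : (PySem.Set.add opened k).length = opened.length + 1 := by
          rw [PySem.Set.add_of_not_mem h.2.2]; simp
        have hmono := pvPassA_len_mono boxes rest (PySem.Set.add opened k)
          (PySem.Set.update keys (pvKeys boxes k))
        omega
      · rename_i h
        rw [if_neg h] at hlen
        obtain ⟨h1, h2, h3⟩ := ih opened keys hlen
        refine ⟨h1, h2, ?_⟩
        intro k2 hk2 h0 hn
        rcases List.mem_cons.mp hk2 with rfl | hk2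
        · by_contra hko
          exact h ⟨h0, hn, hko⟩
        · exact h3 k2 hk2 h0 hn

theorem pvLoopA_good (boxes : List (List Int)) (fuel : Nat)
    (opened keys : List Int)
    (h : pvInvA boxes opened keys)
    (hfuel : boxes.length + 1 ≤ fuel + opened.length) :
    pvGood boxes (pvLoopA boxes.length boxes fuel opened keys) := by
  induction fuel generalizing opened keys with
  | zero =>
      exfalso
      have := pvNodup_bounded_length h.1 (fun x hx => (h.2.2.1 x hx).2)
      omega
  | succ fuel ih =>
      simp only [pvLoopA]
      split
      · rename_i hlen
        simp only [pvSet_len_eq, Nat.cast_inj] at hlen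
        obtain ⟨h1, h2, h3⟩ := pvPassA_fix boxes keys opened keys hlen
        rw [h1]
        obtain ⟨hn, h0, hr, hks, hcov⟩ := h
        exact ⟨hn, h0, hr, fun b hb k hk h0k hkn => h3 k (hcov b hb k hk) h0k hkn⟩
      · rename_i hlen
        simp only [pvSet_len_eq, Nat.cast_inj] at hlen
        have hinv := pvPassA_inv boxes keys opened keys h.2.2.2.1 h
        have hmono := pvPassA_len_mono boxes keys opened keys
        exact ih _ _ hinv (by omega)

-- ---------- B side ----------

def pvInvB (boxes : List (List Int)) (visited stack : List Int) : Prop :=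
  visited.Nodup ∧ 0 ∈ visited ∧
  (∀ x ∈ visited, pvReach boxes x ∧ 0 ≤ x ∧ x < (boxes.length : Int)) ∧
  (∀ s ∈ stack, s ∈ visited) ∧
  (∀ b ∈ visited, b ∈ stack ∨
    ∀ k ∈ pvKeys boxes b, 0 ≤ k → k < (boxes.length : Int) → k ∈ visited)

-- everything the scan of one box's key list guarantees, in one induction
theorem pvScanB_spec (boxes : List (List Int)) (l : List Int)
    (visited stack : List Int)
    (hl : ∀ k ∈ l, 0 ≤ k → k < (boxes.length : Int) → pvReach boxes k)
    (hn : visited.Nodup) :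
    (pvScanB boxes.length l visited stack).1.Nodup ∧
    (∀ x ∈ visited, x ∈ (pvScanB boxes.length l visited stack).1) ∧
    (∀ x ∈ (pvScanB boxes.length l visited stack).1,
      (x ∈ visited ∨ (pvReach boxes x ∧ 0 ≤ x ∧ x < (boxes.length : Int)))) ∧
    (∀ x ∈ (pvScanB boxes.length l visited stack).1, x ∈ visited ∨
      x ∈ (pvScanB boxes.length l visited stack).2) ∧
    (∀ s ∈ stack, s ∈ (pvScanB boxes.length l visited stack).2) ∧
    (∀ s ∈ (pvScanB boxes.length l visited stack).2,
      s ∈ stack ∨ s ∈ (pvScanB boxes.length l visited stack).1) ∧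
    (∀ k ∈ l, 0 ≤ k → k < (boxes.length : Int) →
      k ∈ (pvScanB boxes.length l visited stack).1) ∧
    (pvScanB boxes.length l visited stack).2.length + visited.length =
      stack.length + (pvScanB boxes.length l visited stack).1.length := by
  induction l generalizing visited stack with
  | nil =>
      refine ⟨hn, fun x hx => hx, fun x hx => Or.inl hx, fun x hx => Or.inl hx,
        fun s hs => hs, fun s hs => Or.inl hs, ?_, ?_⟩
      · intro k hk; cases hk
      · simp [pvScanB]
  | cons k rest ih =>
      simp only [pvScanB]
      split
      · rename_i hc
        obtain ⟨h0k, hkn, hkv⟩ := hc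
        have hrk : pvReach boxes k := hl k (List.mem_cons_self) h0k hkn
        obtain ⟨i1, i2, i3, i4, i5, i6, i7, i8⟩ :=
          ih (PySem.Set.add visited k) (k :: stack)
            (fun x hx => hl x (List.mem_cons_of_mem _ hx))
            (PySem.Set.nodup_add _ _ hn)
        have hmem : ∀ x, x ∈ PySem.Set.add visited k ↔ x ∈ visited ∨ x = k :=
          fun x => PySem.Set.mem_add visited k x
        refine ⟨i1, ?_, ?_, ?_, ?_, ?_, ?_, ?_⟩
        · intro x hx; exact i2 x ((hmem x).mpr (Or.inl hx))
        · intro x hx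
          rcases i3 x hx with hx' | hx'
          · rcases (hmem x).mp hx' with h | rfl
            · exact Or.inl h
            · exact Or.inr ⟨hrk, h0k, hkn⟩
          · exact Or.inr hx'
        · intro x hx
          rcases i4 x hx with hx' | hx'
          · rcases (hmem x).mp hx' with h | rfl
            · exact Or.inl h
            · exact Or.inr (i5 _ List.mem_cons_self)
          · exact Or.inr hx'
        · intro s hs; exact i5 s (List.mem_cons_of_mem _ hs)
        · intro s hs
          rcases i6 s hs with hs' | hs'
          · rcases List.mem_cons.mp hs' with rfl | h
            · exact Or.inr (i2 s ((hmem s).mpr (Or.inr rfl)))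
            · exact Or.inl h
          · exact Or.inr hs'
        · intro k2 hk2 h0 hkn2
          rcases List.mem_cons.mp hk2 with rfl | hk2
          · exact i2 k2 ((hmem k2).mpr (Or.inr rfl))
          · exact i7 k2 hk2 h0 hkn2
        · have hlen1 : (PySem.Set.add visited k).length = visited.length + 1 := by
            rw [PySem.Set.add_of_not_mem hkv]; simp
          simp only [List.length_cons] at i8
          omega
      · rename_i hc
        obtain ⟨i1, i2, i3, i4, i5, i6, i7, i8⟩ :=
          ih visited stack (fun x hx => hl x (List.mem_cons_of_mem _ hx)) hn
        refine ⟨i1, i2, i3, i4, i5, i6, ?_, i8⟩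
        intro k2 hk2 h0 hkn2
        rcases List.mem_cons.mp hk2 with rfl | hk2
        · have hkv : k2 ∈ visited := by by_contra h; exact hc ⟨h0, hkn2, h⟩
          exact i2 k2 hkv
        · exact i7 k2 hk2 h0 hkn2

theorem pvDfsB_good (boxes : List (List Int)) (fuel : Nat)
    (visited stack : List Int)
    (h : pvInvB boxes visited stack)
    (hfuel : boxes.length + stack.length ≤ fuel + visited.length) :
    pvGood boxes (pvDfsB boxes.length boxes fuel visited stack) := by
  induction fuel generalizing visited stack with
  | zero =>
      have hbound := pvNodup_bounded_length h.1 (fun x hx => (h.2.2.1 x hx).2)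
      have hstack : stack = [] := by
        cases stack with
        | nil => rfl
        | cons a t => exfalso; simp only [List.length_cons] at hfuel; omega
      subst hstack
      obtain ⟨hn, h0, hr, _, hcl⟩ := h
      exact ⟨hn, h0, hr, fun b hb k hk h0k hkn => by
        rcases hcl b hb with hb' | hb'
        · cases hb'
        · exact hb' k hk h0k hkn⟩
  | succ fuel ih =>
      match stack with
      | [] =>
          obtain ⟨hn, h0, hr, _, hcl⟩ := h
          exact ⟨hn, h0, hr, fun b hb k hk h0k hkn => by
            rcases hcl b hb with hb' | hb'
            · cases hb'
            · exact hb' k hk h0k hkn⟩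
      | box :: rest =>
          obtain ⟨hn, h0, hr, hsv, hcl⟩ := h
          have hbox : box ∈ visited := hsv box List.mem_cons_self
          have hrbox : pvReach boxes box := (hr box hbox).1
          have hl : ∀ k ∈ pvKeys boxes box, 0 ≤ k → k < (boxes.length : Int) →
              pvReach boxes k :=
            fun k hk h0k hkn => pvReach.step hrbox hk h0k hkn
          obtain ⟨i1, i2, i3, i4, i5, i6, i7, i8⟩ :=
            pvScanB_spec boxes (pvKeys boxes box) visited rest hl hn
          simp only [pvDfsB]
          refine ih _ _ ⟨i1, i2 0 h0, ?_, ?_, ?_⟩ ?_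
          · intro x hx
            rcases i3 x hx with hx' | hx'
            · exact hr x hx'
            · exact hx'
          · intro s hs
            rcases i6 s hs with hs' | hs'
            · exact i2 s (hsv s (List.mem_cons_of_mem _ hs'))
            · exact hs'
          · intro b hb
            rcases i4 b hb with hb' | hb'
            · -- b was already visited
              rcases hcl b hb' with hbs | hdone
              · rcases List.mem_cons.mp hbs with rfl | hbr
                · -- b = box: its keys were just scanned
                  exact Or.inr (fun k hk h0k hkn => i7 k hk h0k hkn)
                · exact Or.inl (i5 b hbr)
              · exact Or.inr (fun k hk h0k hkn => i2 k (hdone k hk h0k hkn))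
            · exact Or.inl hb'
          · simp only [List.length_cons] at hfuel
            omega

-- ---------- main ----------

theorem pvMain (boxes : List (List Int)) : canUnlockAll boxes = canUnlockAll_alt boxes := by
  by_cases hb : boxes = []
  · simp [canUnlockAll, canUnlockAll_alt, hb]
  · have hpos : 0 < boxes.length := List.length_pos_iff.mpr hb
    have h0n : (0 : Int) < (boxes.length : Int) := by exact_mod_cast hpos
    have hA : pvGood boxes
        (pvLoopA boxes.length boxes (boxes.length + 1) (PySem.Set.ofList [0])
          (PySem.Set.ofList (pvKeys boxes 0))) := by
      have hol : PySem.Set.ofList ([0] : List Int) = [0] := by decide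
      refine pvLoopA_good boxes (boxes.length + 1) _ _ ?_ ?_
      · rw [hol]
        refine ⟨List.nodup_singleton 0, List.mem_singleton_self 0, ?_, ?_, ?_⟩
        · intro x hx
          rcases List.mem_singleton.mp hx with rfl
          exact ⟨pvReach.zero, le_refl 0, h0n⟩
        · intro k hk h0k hkn
          exact pvReach.step pvReach.zero ((PySem.Set.mem_ofList _ k).mp hk) h0k hkn
        · intro b hbm k hk
          rcases List.mem_singleton.mp hbm with rfl
          exact (PySem.Set.mem_ofList _ k).mpr hk
      · rw [hol]; simp
    have hB : pvGood boxes
        (pvDfsB boxes.length boxes boxes.length (PySem.Set.ofList [0]) [0]) := by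
      have hol : PySem.Set.ofList ([0] : List Int) = [0] := by decide
      refine pvDfsB_good boxes boxes.length _ _ ?_ ?_
      · rw [hol]
        refine ⟨List.nodup_singleton 0, List.mem_singleton_self 0, ?_, ?_, ?_⟩
        · intro x hx
          rcases List.mem_singleton.mp hx with rfl
          exact ⟨pvReach.zero, le_refl 0, h0n⟩
        · intro s hs; exact hs
        · intro b hbm
          exact Or.inl hbm
      · rw [hol]
    have hlen := pvGood_length_eq hA hB
    simp only [canUnlockAll, canUnlockAll_alt, if_neg hb, pvSet_len_eq, hlen]
    rfl

-- ===== VERDICT (by name: the statement is the Claim_ definition above) =====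
theorem canUnlockAll_spec : Claim_equal_canUnlockAll := by
  intro boxes _
  unfold Spec_canUnlockAll
  exact pvMain boxes
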